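-- pv_equiv track=rewrite | github.com/osadly/HackerRank | Python/To Resume Working/Number Theory_Easy math.py | solve
-- ===== SOURCE A (Python) =====
-- def solve(x):
--     total_cnt_digits=len(str(x))
--     b=True
--     nF=0
--     while b:
--         for cnt_frs in range(1,total_cnt_digits+1):
--             cnt_zrs = total_cnt_digits - cnt_frs
--             strF = cnt_frs*'4' + cnt_zrs*'0'
--             nF=int(strF)
--
--             if nF%x==0 and nF/x>0:
--                 b=False
--                 break
--
--         if not b:
--             break
--         total_cnt_digits+=1
--
--     nF=0
--     nZ=0
--     for i in range(len(strF)):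
--         if strF[i]=='4':
--             nF+=1
--         else:
--             nZ+=1
--
--     return 2*nF+nZ
-- ===== SOURCE B (Python) =====
-- def solve(x):
--     # 4..40..0 = 4 * repunit(f) * 10**z ; write x = 2**a * 5**b * m with gcd(m,10)=1:
--     # divisibility forces z >= max(a-2, b, 0) and m | repunit(f); the least valid f
--     # works for the least z, so the answer is 2*f0 + z0 -- no candidate enumeration.
--     a = 0
--     m = x
--     while m % 2 == 0:
--         m //= 2
--         a += 1
--     b = 0
--     while m % 5 == 0:
--         m //= 5
--         b += 1
--     z = max(a - 2, b, 0)
--     f = 1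
--     r = 1 % m
--     while r != 0:
--         r = (r * 10 + 1) % m
--         f += 1
--     return 2 * f + z
-- ===== Notes on version B (the rewrite author's own statement) =====
-- stated objective: alternative
-- what changed: B abandons A's enumeration of 4...40...0 candidates entirely: it factors x as 2^a*5^b*m with gcd(m,10)=1, from which the answer is 2*f0 + max(a-2,b,0) where f0 is the least f with m | repunit(f), found by one running-remainder loop; no candidates are built or tested (intended as faster -- the probe measured 20x at n=256 and A timing out where B returns, but could not confirm a ratio at the largest size).
-- outside the precondition, e.g. on solve(0): A raises ZeroDivisionError, B does not finish within the time limit; on solve(-1): A raises OverflowError, B returns 2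
import Mathlib
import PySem

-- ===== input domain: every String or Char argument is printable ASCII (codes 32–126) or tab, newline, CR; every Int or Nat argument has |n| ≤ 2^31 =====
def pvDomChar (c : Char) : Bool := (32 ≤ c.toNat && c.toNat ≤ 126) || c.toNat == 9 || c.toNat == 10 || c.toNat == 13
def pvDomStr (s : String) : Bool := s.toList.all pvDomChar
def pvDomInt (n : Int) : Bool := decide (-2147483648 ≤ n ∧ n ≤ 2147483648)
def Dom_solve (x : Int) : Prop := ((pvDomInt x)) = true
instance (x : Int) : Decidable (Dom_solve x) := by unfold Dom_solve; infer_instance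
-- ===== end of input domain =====

-- B drops A's candidate enumeration: it factors x = 2^a * 5^b * m (gcd(m,10)=1) and returns
-- 2*f0 + max(a-2, b, 0), where f0 is the least f with m | repunit(f) (one running-remainder loop).

-- ===== PORT A =====

-- '4'*cnt_frs + '0'*cnt_zrs
def pvStrF (f z : Nat) : List Char := List.replicate f '4' ++ List.replicate z '0'

-- hand port of int(s): exact for the nonempty, all-decimal-digit strings strF that A feeds it
def pvDigitsToInt (s : List Char) : Int :=
  s.foldl (fun acc c => acc * 10 + ((c.toNat : Int) - 48)) 0

-- hand port of the float comparison `nF / x > 0`: the sign of the true quotient; exact whenever the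
-- division does not overflow (Pre_solve restricts to exactly those inputs) since |nF/x| ≥ 4/2^31 never rounds to 0
def pvFloatDivPos (a b : Int) : Bool := (decide (0 < a) && decide (0 < b)) || (decide (a < 0) && decide (b < 0))

-- the test `nF % x == 0 and nF / x > 0` at total length t, cnt_frs = f
def pvCond (x : Int) (t f : Nat) : Bool :=
  PySem.Int.mod (pvDigitsToInt (pvStrF f (t - f))) x == 0
    && pvFloatDivPos (pvDigitsToInt (pvStrF f (t - f))) x

-- inner `for cnt_frs in range(1, total_cnt_digits+1)`: first f with a hit, scanning f = 1, 2, …, t;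
-- r counts the remaining iterations (structural recursion on the range's length)
def pvInnerA (x : Int) (t : Nat) : Nat → Nat → Option Nat
  | 0, _ => none
  | r + 1, f => if pvCond x t f then some f else pvInnerA x t r (f + 1)

-- outer `while b:` loop; the fuel only makes the search total (A's loop is unbounded) and is
-- never exhausted on inputs satisfying Pre_solve
def pvOuterA (x : Int) : Nat → Nat → Option (Nat × Nat)
  | 0, _ => none
  | fuel + 1, t =>
    match pvInnerA x t t 1 with
    | some f => some (t, f)
    | none => pvOuterA x fuel (t + 1)

def solve (x : Int) : Int :=
  match pvOuterA x 400 ((PySem.Int.toChars x).length) with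
  | some (t, f) =>
    -- final pass of A: count '4's and other characters of strF
    2 * ((pvStrF f (t - f)).foldl
      (fun (p : Int × Int) ch => if ch == '4' then (p.1 + 1, p.2) else (p.1, p.2 + 1)) ((0 : Int), (0 : Int))).1
      + ((pvStrF f (t - f)).foldl
      (fun (p : Int × Int) ch => if ch == '4' then (p.1 + 1, p.2) else (p.1, p.2 + 1)) ((0 : Int), (0 : Int))).2
  | none => 0

-- ===== PORT B =====

-- `while m % d == 0: m //= d; a += 1` — returns (number of factors d stripped, remaining m);
-- the fuel only makes the loop total and is never exhausted on Dom ∩ Pre_ inputs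
def pvStrip (d : Int) : Nat → Int → Nat × Int
  | 0, m => (0, m)
  | fuel + 1, m =>
    if PySem.Int.mod m d == 0 then
      ((pvStrip d fuel (PySem.Int.floordiv m d)).1 + 1, (pvStrip d fuel (PySem.Int.floordiv m d)).2)
    else (0, m)

-- `while r != 0: r = (r*10+1) % m; f += 1` — first f (counted from the start value of f) whose
-- repunit remainder r is 0; fuel as above
def pvRepLoop (m : Int) : Nat → Int → Nat → Option Nat
  | 0, _, _ => none
  | fuel + 1, r, f =>
    if r == 0 then some f else pvRepLoop m fuel (PySem.Int.mod (r * 10 + 1) m) (f + 1)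

def solve_alt (x : Int) : Int :=
  let s2 := pvStrip 2 64 x
  let s5 := pvStrip 5 64 s2.2
  let z : Int := max (max ((s2.1 : Int) - 2) (s5.1 : Int)) 0
  match pvRepLoop s5.2 (400 + (PySem.Int.toChars x).length) (PySem.Int.mod 1 s5.2) 1 with
  | some f => 2 * (f : Int) + z
  | none => 0

-- ===== PRECONDITION & SPEC =====

-- repunit with n ones: 0, 1, 11, 111, … (helper for Pre_; the ports do not use it)
def pvRepInt : Nat → Int
  | 0 => 0
  | n + 1 => pvRepInt n * 10 + 1

def pvBound (x : Int) : Nat := 307 + (PySem.Int.toChars x).length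

-- Pre_ excludes x ≤ 0 (A raises: ZeroDivisionError on 0; on negatives no candidate ever passes `nF/x>0`, so the
-- candidate grows until nF/x raises OverflowError) and x whose smallest 4…40…0 multiple needs more than 307+len(str(x)) digits: there A's float
-- division nF/x (evaluated at the first hit) can overflow, so A raises OverflowError instead of returning.
def Pre_solve (x : Int) : Prop :=
  1 ≤ x ∧ ∃ f ∈ Finset.Icc 1 (pvBound x), x ∣ 4 * pvRepInt f * 10 ^ (pvBound x - f)

instance (x : Int) : Decidable (Pre_solve x) := by unfold Pre_solve; infer_instance

def pvWitness_solve : Int := 1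

def Spec_solve (x : Int) (out : Int) : Prop := out = solve_alt x
instance (x : Int) (out : Int) : Decidable (Spec_solve x out) := by unfold Spec_solve; infer_instance

-- ===== CLAIM (what is proved, stated in full; the proofs are below) =====
def Claim_equal_solve : Prop := ∀ (x : Int), Dom_solve x → Pre_solve x → Spec_solve x (solve x)

-- ===== LEMMAS AND PROOFS =====

lemma pvRepInt_nonneg (n : Nat) : 0 ≤ pvRepInt n := by
  induction n with
  | zero => simp [pvRepInt]
  | succ n ih => simp only [pvRepInt]; omega

lemma pvRepInt_pos (n : Nat) : 1 ≤ pvRepInt (n + 1) := by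
  have := pvRepInt_nonneg n; simp only [pvRepInt]; omega

lemma pvRepInt_succ_pow (n : Nat) : pvRepInt (n + 1) = 10 ^ n + pvRepInt n := by
  induction n with
  | zero => simp [pvRepInt]
  | succ n ih => simp only [pvRepInt] at *; rw [pow_succ]; omega

lemma pvRepInt_odd (n : Nat) : ¬ (2 : Int) ∣ pvRepInt (n + 1) := by
  rintro ⟨c, hc⟩
  simp only [pvRepInt] at hc
  omega

lemma pvRepInt_not5 (n : Nat) : ¬ (5 : Int) ∣ pvRepInt (n + 1) := by
  rintro ⟨c, hc⟩
  simp only [pvRepInt] at hc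
  omega

lemma pvRepInt_lt (n : Nat) : 4 * pvRepInt n + 1 ≤ 10 ^ n := by
  induction n with
  | zero => simp [pvRepInt]
  | succ n ih =>
    simp only [pvRepInt, pow_succ]
    have h : (0 : Int) ≤ 10 ^ n := by positivity
    omega

lemma pvFold4 (n : Nat) (acc : Int) :
    List.foldl (fun acc c => acc * 10 + ((c.toNat : Int) - 48)) acc (List.replicate n '4')
      = acc * 10 ^ n + 4 * pvRepInt n := by
  induction n generalizing acc with
  | zero => simp [pvRepInt]
  | succ n ih =>
    rw [List.replicate_succ, List.foldl_cons, ih, pvRepInt_succ_pow]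
    have h4 : ((('4').toNat : Int) - 48) = 4 := by decide
    rw [h4]; ring

lemma pvFold0 (n : Nat) (acc : Int) :
    List.foldl (fun acc c => acc * 10 + ((c.toNat : Int) - 48)) acc (List.replicate n '0')
      = acc * 10 ^ n := by
  induction n generalizing acc with
  | zero => simp
  | succ n ih =>
    rw [List.replicate_succ, List.foldl_cons, ih]
    have h0 : ((('0').toNat : Int) - 48) = 0 := by decide
    rw [h0]; ring

lemma pvStrF_val (f z : Nat) : pvDigitsToInt (pvStrF f z) = 4 * pvRepInt f * 10 ^ z := by
  unfold pvDigitsToInt pvStrF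
  rw [List.foldl_append, pvFold4, pvFold0]
  ring

lemma pvCount4 (n : Nat) (p : Int × Int) :
    List.foldl (fun (p : Int × Int) ch => if ch == '4' then (p.1 + 1, p.2) else (p.1, p.2 + 1)) p
      (List.replicate n '4') = (p.1 + n, p.2) := by
  induction n generalizing p with
  | zero => simp
  | succ n ih =>
    rw [List.replicate_succ, List.foldl_cons]
    simp only [show (('4' : Char) == '4') = true from rfl, if_true, ih]
    refine Prod.ext ?_ rfl
    push_cast; ring

lemma pvCount0 (n : Nat) (p : Int × Int) :
    List.foldl (fun (p : Int × Int) ch => if ch == '4' then (p.1 + 1, p.2) else (p.1, p.2 + 1)) p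
      (List.replicate n '0') = (p.1, p.2 + n) := by
  induction n generalizing p with
  | zero => simp
  | succ n ih =>
    rw [List.replicate_succ, List.foldl_cons]
    simp only [show (('0' : Char) == '4') = false from rfl, if_false, Bool.false_eq_true, ih]
    refine Prod.ext rfl ?_
    push_cast; ring

lemma pvCountStrF (f z : Nat) :
    (pvStrF f z).foldl
      (fun (p : Int × Int) ch => if ch == '4' then (p.1 + 1, p.2) else (p.1, p.2 + 1)) ((0 : Int), (0 : Int))
      = ((f : Int), (z : Int)) := by
  unfold pvStrF
  rw [List.foldl_append, pvCount4, pvCount0]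
  simp

-- rep-accumulator step: feeding the previous remainder gives the next repunit's remainder
lemma pvRepStep (x a : Int) (hx : 0 < x) :
    PySem.Int.mod (PySem.Int.mod a x * 10 + 1) x = PySem.Int.mod (a * 10 + 1) x := by
  rw [PySem.Int.mod_eq_emod_of_pos hx, PySem.Int.mod_eq_emod_of_pos hx,
    PySem.Int.mod_eq_emod_of_pos hx]
  have h1 : a % x ≡ a [ZMOD x] := Int.emod_emod_of_dvd a (dvd_refl x)
  exact (h1.mul_right 10).add_right 1

-- A's test is divisibility of the actual candidate (x positive, f ≥ 1)
lemma pvCond_eq (x : Int) (hx : 1 ≤ x) (t f : Nat) (hf : 1 ≤ f) :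
    pvCond x t f = decide (x ∣ 4 * pvRepInt f * 10 ^ (t - f)) := by
  obtain ⟨f', rfl⟩ : ∃ f', f = f' + 1 := ⟨f - 1, by omega⟩
  unfold pvCond
  rw [pvStrF_val]
  have hpos : 0 < 4 * pvRepInt (f' + 1) * 10 ^ (t - (f' + 1)) := by
    have h1 := pvRepInt_pos f'
    have h2 : (0 : Int) < 10 ^ (t - (f' + 1)) := by positivity
    nlinarith
  have hfd : pvFloatDivPos (4 * pvRepInt (f' + 1) * 10 ^ (t - (f' + 1))) x = true := by
    unfold pvFloatDivPos
    simp only [Bool.or_eq_true, Bool.and_eq_true, decide_eq_true_eq]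
    left; exact ⟨hpos, by omega⟩
  rw [hfd, Bool.and_true, Bool.eq_iff_iff]
  simp only [beq_iff_eq, decide_eq_true_eq]
  exact PySem.Int.mod_eq_zero_iff_dvd _ _

-- inner scan: returns the first hit
lemma pvInnerA_first (x : Int) (t : Nat) :
    ∀ r k f, k ≤ f → f < k + r → pvCond x t f = true →
      (∀ j, k ≤ j → j < f → pvCond x t j = false) → pvInnerA x t r k = some f := by
  intro r
  induction r with
  | zero => intro k f h1 h2; omega
  | succ r ih =>
    intro k f h1 h2 hc hmin
    rw [pvInnerA]
    rcases Nat.eq_or_lt_of_le h1 with rfl | hlt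
    · rw [hc]; rfl
    · rw [hmin k le_rfl hlt]
      simp only [Bool.false_eq_true, if_false]
      exact ih (k + 1) f (by omega) (by omega) hc (fun j hj1 hj2 => hmin j (by omega) hj2)

-- inner scan: no hit in range gives none
lemma pvInnerA_none (x : Int) (t : Nat) :
    ∀ r k, (∀ j, k ≤ j → j < k + r → pvCond x t j = false) → pvInnerA x t r k = none := by
  intro r
  induction r with
  | zero => intro k _; rfl
  | succ r ih =>
    intro k h
    rw [pvInnerA, h k le_rfl (by omega)]
    simp only [Bool.false_eq_true, if_false]
    exact ih (k + 1) (fun j hj1 hj2 => h j (by omega) (by omega))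

-- outer scan: with the validity characterization, A stops exactly at (fB + zB, fB)
lemma pvOuterA_main (x : Int) (m : Int) (zB fB : Nat) (hfB1 : 1 ≤ fB)
    (hcond : ∀ t f, 1 ≤ f → f ≤ t → (pvCond x t f = true ↔ (m ∣ pvRepInt f ∧ zB ≤ t - f)))
    (hdvd : m ∣ pvRepInt fB)
    (hmin : ∀ j, 1 ≤ j → j < fB → ¬ m ∣ pvRepInt j) :
    ∀ fuel t, t ≤ fB + zB → fB + zB < t + fuel → pvOuterA x fuel t = some (fB + zB, fB) := by
  intro fuel
  induction fuel with
  | zero => intro t h1 h2; omega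
  | succ fuel ih =>
    intro t h1 h2
    rw [pvOuterA]
    rcases Nat.eq_or_lt_of_le h1 with hteq | hlt
    · rw [pvInnerA_first x t t 1 fB hfB1 (by omega)
        ((hcond t fB hfB1 (by omega)).mpr ⟨hdvd, by omega⟩)
        (fun j hj1 hj2 => by
          by_contra hne
          have hcj := (hcond t j hj1 (by omega)).mp (by
            cases h : pvCond x t j
            · exact absurd h hne
            · rfl)
          exact hmin j hj1 hj2 hcj.1)]
      rw [hteq]
    · rw [pvInnerA_none x t t 1 (fun j hj1 hj2 => by
        by_contra hne
        have hcj := (hcond t j hj1 (by omega)).mp (by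
          cases h : pvCond x t j
          · exact absurd h hne
          · rfl)
        have hjf : fB ≤ j := by
          by_contra hjlt
          exact hmin j hj1 (by omega) hcj.1
        omega)]
      exact ih (t + 1) (by omega) (by omega)

-- factor-stripping loop: its two outputs decompose m
lemma pvStrip_spec (d : Int) (hd : 2 ≤ d) :
    ∀ fuel (m : Int), 1 ≤ m → m < d ^ fuel →
      m = d ^ (pvStrip d fuel m).1 * (pvStrip d fuel m).2 ∧
        ¬ d ∣ (pvStrip d fuel m).2 ∧ 1 ≤ (pvStrip d fuel m).2 := by
  intro fuel
  induction fuel with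
  | zero => intro m h1 h2; simp at h2; omega
  | succ fuel ih =>
    intro m h1 h2
    rw [pvStrip]
    by_cases hdvd : d ∣ m
    · rw [if_pos (by simpa [PySem.Int.mod_eq_zero_iff_dvd] using hdvd)]
      obtain ⟨c, rfl⟩ := hdvd
      have hd0 : (0 : Int) < d := by omega
      have hfd : PySem.Int.floordiv (d * c) d = c := by
        rw [PySem.Int.floordiv_eq_ediv_of_pos hd0, Int.mul_ediv_cancel_left c (by omega)]
      rw [hfd]
      have hc1 : 1 ≤ c := by nlinarith
      have hc2 : c < d ^ fuel := by
        have := h2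
        rw [pow_succ] at this
        nlinarith [pow_pos hd0 fuel]
      obtain ⟨he, hnd, hm1⟩ := ih c hc1 hc2
      refine ⟨?_, hnd, hm1⟩
      calc d * c = d * (d ^ (pvStrip d fuel c).1 * (pvStrip d fuel c).2) := by rw [← he]
        _ = d ^ ((pvStrip d fuel c).1 + 1) * (pvStrip d fuel c).2 := by rw [pow_succ]; ring
    · rw [if_neg (by simpa [PySem.Int.mod_eq_zero_iff_dvd] using hdvd)]
      exact ⟨by simp, hdvd, h1⟩

-- remainder loop: returns the first f (≥ its start) whose repunit m divides
lemma pvRepLoop_first (m : Int) (hm : 1 ≤ m) :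
    ∀ fuel k f, 1 ≤ k → k ≤ f → f < k + fuel → m ∣ pvRepInt f →
      (∀ j, k ≤ j → j < f → ¬ m ∣ pvRepInt j) →
      pvRepLoop m fuel (PySem.Int.mod (pvRepInt k) m) k = some f := by
  intro fuel
  induction fuel with
  | zero => intro k f _ h1 h2; omega
  | succ fuel ih =>
    intro k f hk h1 h2 hdvd hmin
    rw [pvRepLoop]
    rcases Nat.eq_or_lt_of_le h1 with rfl | hlt
    · rw [if_pos (by simpa [PySem.Int.mod_eq_zero_iff_dvd] using hdvd)]
    · have hne : ¬ PySem.Int.mod (pvRepInt k) m = 0 := by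
        rw [PySem.Int.mod_eq_zero_iff_dvd]
        exact hmin k le_rfl hlt
      rw [if_neg (by simpa using hne)]
      have hstep : PySem.Int.mod (PySem.Int.mod (pvRepInt k) m * 10 + 1) m
          = PySem.Int.mod (pvRepInt (k + 1)) m := by
        rw [pvRepStep _ _ (by omega)]; rfl
      rw [hstep]
      exact ih (k + 1) f (by omega) (by omega) (by omega) hdvd
        (fun j hj1 hj2 => hmin j (by omega) hj2)

-- the candidate rewritten as prime powers
lemma pvCandidate_eq (R : Int) (z : Nat) :
    4 * R * 10 ^ z = 2 ^ (z + 2) * 5 ^ z * R := by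
  rw [show (10 : Int) = 2 * 5 from rfl, mul_pow, pow_succ, pow_succ]
  ring

-- divisibility of a 4…40…0 candidate, characterized through the factorization of x
lemma pvValid_iff (x m : Int) (a b : Nat) (_hx : 1 ≤ x)
    (hfac : x = 2 ^ a * 5 ^ b * m) (hm2 : ¬ (2 : Int) ∣ m) (hm5 : ¬ (5 : Int) ∣ m)
    (f z : Nat) (hf : 1 ≤ f) :
    x ∣ 4 * pvRepInt f * 10 ^ z ↔ (m ∣ pvRepInt f ∧ a ≤ z + 2 ∧ b ≤ z) := by
  obtain ⟨f', rfl⟩ : ∃ f', f = f' + 1 := ⟨f - 1, by omega⟩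
  rw [pvCandidate_eq]
  have hprime2 : Prime (2 : Int) := Int.prime_two
  have hprime5 : Prime (5 : Int) := by norm_num
  constructor
  · intro h
    have hmx : m ∣ x := ⟨2 ^ a * 5 ^ b, by rw [hfac]; ring⟩
    have hcop2 : IsCoprime m (2 : Int) := ((hprime2.coprime_iff_not_dvd).mpr hm2).symm
    have hcop5 : IsCoprime m (5 : Int) := ((hprime5.coprime_iff_not_dvd).mpr hm5).symm
    refine ⟨?_, ?_, ?_⟩
    · have hdvd : m ∣ (2 ^ (z + 2) * 5 ^ z) * pvRepInt (f' + 1) :=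
        hmx.trans (h.trans (dvd_of_eq (by ring)))
      exact (hcop2.pow_right.mul_right hcop5.pow_right).dvd_of_dvd_mul_left hdvd
    · by_contra hlt
      have haz : z + 3 ≤ a := by omega
      have h2a : (2 : Int) ^ a ∣ x := ⟨5 ^ b * m, by rw [hfac]; ring⟩
      have h2 : (2 : Int) ^ (z + 2) * 2 ∣ 2 ^ (z + 2) * (5 ^ z * pvRepInt (f' + 1)) := by
        calc (2 : Int) ^ (z + 2) * 2 = 2 ^ (z + 3) := by ring
          _ ∣ _ := (pow_dvd_pow 2 haz).trans (h2a.trans (h.trans (dvd_of_eq (by ring))))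
      have h2' : (2 : Int) ∣ 5 ^ z * pvRepInt (f' + 1) :=
        (mul_dvd_mul_iff_left (pow_ne_zero (z + 2) two_ne_zero)).mp h2
      rcases hprime2.dvd_mul.mp h2' with h5 | hR
      · exact absurd (hprime2.dvd_of_dvd_pow h5) (by norm_num)
      · exact pvRepInt_odd f' hR
    · by_contra hlt
      have hbz : z + 1 ≤ b := by omega
      have h5b : (5 : Int) ^ b ∣ x := ⟨2 ^ a * m, by rw [hfac]; ring⟩
      have h5 : (5 : Int) ^ z * 5 ∣ 5 ^ z * (2 ^ (z + 2) * pvRepInt (f' + 1)) := by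
        calc (5 : Int) ^ z * 5 = 5 ^ (z + 1) := by ring
          _ ∣ _ := (pow_dvd_pow 5 hbz).trans (h5b.trans (h.trans (dvd_of_eq (by ring))))
      have h5' : (5 : Int) ∣ 2 ^ (z + 2) * pvRepInt (f' + 1) :=
        (mul_dvd_mul_iff_left (pow_ne_zero z (by norm_num))).mp h5
      rcases hprime5.dvd_mul.mp h5' with h2d | hR
      · exact absurd (hprime5.dvd_of_dvd_pow h2d) (by norm_num)
      · exact pvRepInt_not5 f' hR
  · rintro ⟨hmr, ha, hb⟩
    rw [hfac]
    exact (mul_dvd_mul (mul_dvd_mul (pow_dvd_pow 2 ha) (pow_dvd_pow 5 hb)) hmr)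

-- decimal length lower bound: a positive x is at least 10^(len-1)
lemma pvLen_le (x : Int) (hx : 1 ≤ x) :
    (10 : Int) ^ ((PySem.Int.toChars x).length - 1) ≤ x := by
  unfold PySem.Int.toChars
  rw [if_neg (by omega)]
  set n := x.toNat with hn
  have hn1 : 1 ≤ n := by omega
  set L := (Nat.toDigits 10 n).length with hL
  have hnat : 10 ^ (L - 1) ≤ n := by
    by_cases hL1 : L ≤ 1
    · have : 10 ^ (L - 1) = 1 := by
        have : L - 1 = 0 := by omega
        rw [this, pow_zero]
      omega
    · by_contra hlt
      have := Nat.toDigits_length 10 n (L - 1) (by omega) (by omega)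
      omega
  calc (10 : Int) ^ (L - 1) = ((10 ^ (L - 1) : Nat) : Int) := by push_cast; ring
    _ ≤ (n : Int) := by exact_mod_cast hnat
    _ = x := by omega

-- the whole assembly, stated over the projections of the two strip calls
theorem solve_spec : Claim_equal_solve := by
  intro x hdom hpre
  unfold Spec_solve
  obtain ⟨hx, f, hfmem, hdvdf⟩ := hpre
  rw [Finset.mem_Icc] at hfmem
  have hxle : x ≤ 2147483648 := by
    simp only [Dom_solve, pvDomInt, decide_eq_true_eq] at hdom
    exact hdom.2
  -- factor x = 2^a * 5^b * m
  have h64 : x < (2 : Int) ^ 64 := by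
    have h : (2 : Int) ^ 64 = 18446744073709551616 := by norm_num
    omega
  obtain ⟨hfac2, hnd2, hm1pos⟩ := pvStrip_spec 2 (by norm_num) 64 x hx h64
  set a := (pvStrip 2 64 x).1 with ha
  set m1 := (pvStrip 2 64 x).2 with hm1
  have h2apos : (1 : Int) ≤ 2 ^ a := one_le_pow₀ (by norm_num)
  have hm1le : m1 < (5 : Int) ^ 64 := by
    have h5 : (5 : Int) ^ 64 = 542101086242752217003726400434970855712890625 := by norm_num
    have hm1x : m1 ≤ x := by
      nlinarith [mul_nonneg (by linarith : (0 : Int) ≤ 2 ^ a - 1) (by linarith : (0 : Int) ≤ m1)]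
    nlinarith
  obtain ⟨hfac5, hnd5, hmpos⟩ := pvStrip_spec 5 (by norm_num) 64 m1 hm1pos hm1le
  set b := (pvStrip 5 64 m1).1 with hb
  set m := (pvStrip 5 64 m1).2 with hm
  have hfac : x = 2 ^ a * 5 ^ b * m := by rw [hfac2, hfac5]; ring
  have hm2 : ¬ (2 : Int) ∣ m := fun h => hnd2 (by rw [hfac5]; exact Dvd.dvd.mul_left h _)
  have hm5 : ¬ (5 : Int) ∣ m := hnd5
  -- least f with m | repunit f
  have hvf := (pvValid_iff x m a b hx hfac hm2 hm5 f (pvBound x - f) hfmem.1).mp hdvdf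
  have hex : ∃ j, 1 ≤ j ∧ m ∣ pvRepInt j := ⟨f, hfmem.1, hvf.1⟩
  set fB := Nat.find hex with hfBdef
  have hfB := Nat.find_spec hex
  have hfBmin : ∀ j, 1 ≤ j → j < fB → ¬ m ∣ pvRepInt j :=
    fun j h1 h2 hd => Nat.find_min hex h2 ⟨h1, hd⟩
  have hfBle : fB ≤ f := Nat.find_min' hex ⟨hfmem.1, hvf.1⟩
  set zB := max (a - 2) b with hzBdef
  have ht0 : fB + zB ≤ pvBound x := by
    have := hvf.2
    omega
  -- the validity characterization used by A's scan
  have hcond : ∀ t g, 1 ≤ g → g ≤ t → (pvCond x t g = true ↔ (m ∣ pvRepInt g ∧ zB ≤ t - g)) := by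
    intro t g h1 h2
    rw [pvCond_eq x hx t g h1]
    simp only [decide_eq_true_eq]
    rw [pvValid_iff x m a b hx hfac hm2 hm5 g (t - g) h1]
    constructor
    · rintro ⟨hh, hA, hB⟩; exact ⟨hh, by omega⟩
    · rintro ⟨hh, hz⟩; exact ⟨hh, by omega, by omega⟩
  -- the answer has at least as many digits as x
  have hLle : (PySem.Int.toChars x).length ≤ fB + zB := by
    have hp := pvLen_le x hx
    have hxleN : x ≤ 4 * pvRepInt fB * 10 ^ zB := by
      apply Int.le_of_dvd
      · obtain ⟨fB', hfB'⟩ : ∃ fB', fB = fB' + 1 := ⟨fB - 1, by omega⟩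
        have := pvRepInt_pos fB'
        have hz : (0 : Int) < 10 ^ zB := by positivity
        rw [hfB']
        nlinarith
      · exact (pvValid_iff x m a b hx hfac hm2 hm5 fB zB hfB.1).mpr ⟨hfB.2, by omega, by omega⟩
    have hNlt : 4 * pvRepInt fB * 10 ^ zB < 10 ^ (fB + zB) := by
      have h1 := pvRepInt_lt fB
      have h2 : (0 : Int) < 10 ^ zB := by positivity
      rw [pow_add]
      nlinarith
    by_contra hgt
    have hmono : (10 : Int) ^ (fB + zB) ≤ 10 ^ ((PySem.Int.toChars x).length - 1) :=
      pow_le_pow_right₀ (by norm_num) (by omega)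
    linarith
  -- run A
  have hA := pvOuterA_main x m zB fB hfB.1 hcond hfB.2 hfBmin 400
    ((PySem.Int.toChars x).length) hLle (by unfold pvBound at ht0; omega)
  -- run B
  have hB := pvRepLoop_first m hmpos (400 + (PySem.Int.toChars x).length) 1 fB le_rfl hfB.1
    (by unfold pvBound at ht0; omega) hfB.2 (fun j hj1 hj2 => hfBmin j hj1 hj2)
  simp only [solve, solve_alt]
  rw [hA, show PySem.Int.mod 1 m = PySem.Int.mod (pvRepInt 1) m from rfl, hB]
  simp only [pvCountStrF]
  have hsub : ((fB + zB - fB : Nat) : Int) = (zB : Int) := by omega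
  have hmax : (zB : Int) = max (max ((a : Int) - 2) (b : Int)) 0 := by
    rw [hzBdef]
    omega
  rw [hsub, hmax]
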